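-- pv_equiv track=rewrite | github.com/zjohnsilver/college-codes | ProgramasPython/IAImplementations/programa-v1/principal.py | ajustarSaida
-- ===== SOURCE A (Python) =====
-- def ajustarSaida(strSaida):
-- 	count = 0
-- 	newSaida = ""
-- 	for i in strSaida:
-- 		newSaida += i + " => "
--
-- 	new = " "
--
-- 	for i in newSaida:
-- 		new += i
-- 		if i == ">":
-- 			count+=1
-- 		if count==2:
-- 			new+="\n"
-- 			count=0
-- 	return new
-- ===== SOURCE B (Python) =====
-- def ajustarSaida(strSaida):
--     s = "".join(c + " => " for c in strSaida)
--     parts = s.split(">")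
--     out = [" " + parts[0]]
--     for idx in range(1, len(parts)):
--         out.append(">")
--         if idx % 2 == 0:
--             out.append("\n")
--         out.append(parts[idx])
--     return "".join(out)
-- ===== Notes on version B (the rewrite author's own statement) =====
-- stated objective: alternative
-- what changed: A rescans the expanded buffer character by character with a separator counter that resets at 2 to decide where newlines go; B splits the expanded buffer on '>' and rejoins the pieces, re-inserting the separator and adding a newline at every second join index.
import Mathlib
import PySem

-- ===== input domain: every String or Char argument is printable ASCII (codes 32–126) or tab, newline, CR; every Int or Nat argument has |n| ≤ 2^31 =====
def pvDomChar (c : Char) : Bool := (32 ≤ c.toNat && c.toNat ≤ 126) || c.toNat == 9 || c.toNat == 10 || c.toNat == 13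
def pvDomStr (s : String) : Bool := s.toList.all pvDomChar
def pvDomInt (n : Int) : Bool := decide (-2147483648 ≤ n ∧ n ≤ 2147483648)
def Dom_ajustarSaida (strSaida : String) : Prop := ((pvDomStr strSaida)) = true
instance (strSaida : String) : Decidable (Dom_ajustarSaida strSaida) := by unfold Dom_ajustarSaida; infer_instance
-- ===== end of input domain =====

-- B splits the expanded buffer on '>' and rejoins the pieces, inserting the separator back
-- and a newline at every second join index, instead of A's per-character scan with a counter.

-- ===== PORT A =====
-- loop body of A's second loop (append the char, count separators, newline at count==2)
def pvStepA (st : List Char × Int) (i : Char) : List Char × Int :=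
  let new := st.1 ++ [i]
  let count := if i == '>' then st.2 + 1 else st.2
  if count == 2 then (new ++ ['\n'], 0) else (new, count)

def ajustarSaida (strSaida : String) : String :=
  let newSaida := strSaida.toList.foldl (fun ns i => ns ++ (i :: " => ".toList)) []
  let r := newSaida.foldl pvStepA ([' '], (0 : Int))
  String.ofList r.1

-- ===== PORT B =====
-- loop body of B: push back the separator, a newline at even indices, and the next piece
def pvStepB (parts : List (List Char)) (out : List (List Char)) (idx : Int) : List (List Char) :=
  ((out ++ [['>']]) ++ (if PySem.Int.mod idx 2 == 0 then [['\n']] else []))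
    ++ [PySem.List.pyGetD parts idx []]

def ajustarSaida_alt (strSaida : String) : String :=
  let s := PySem.Chars.join [] (strSaida.toList.map (fun c => c :: " => ".toList))
  let parts := PySem.Chars.splitOn s ">".toList
  let out := (PySem.List.pyRange 1 parts.length 1).foldl (pvStepB parts)
    [' ' :: PySem.List.pyGetD parts 0 []]
  String.ofList (PySem.Chars.join [] out)

-- ===== PRECONDITION & SPEC =====
def Spec_ajustarSaida (strSaida : String) (out : String) : Prop := out = ajustarSaida_alt strSaida
instance (strSaida : String) (out : String) : Decidable (Spec_ajustarSaida strSaida out) := by unfold Spec_ajustarSaida; infer_instance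

-- ===== CLAIM (what is proved, stated in full; the proofs are below) =====
def Claim_equal_ajustarSaida : Prop := ∀ (strSaida : String), Dom_ajustarSaida strSaida → Spec_ajustarSaida strSaida (ajustarSaida strSaida)

-- ===== LEMMAS AND PROOFS =====

-- split on '>' , directly structural
def pvSplit : List Char → List (List Char)
  | [] => [[]]
  | c :: t => if c = '>' then [] :: pvSplit t
              else (c :: (pvSplit t).headD []) :: (pvSplit t).tail

-- rebuild: one '>' per remaining piece, newline when the flag is set, flag alternates
def pvRe : List (List Char) → Bool → List Char
  | [], _ => []
  | p :: ps, b => '>' :: ((if b then ['\n'] else []) ++ p ++ pvRe ps (!b))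

theorem pvSplit_ne_nil (cs : List Char) : pvSplit cs ≠ [] := by
  cases cs with
  | nil => simp [pvSplit]
  | cons c t => by_cases h : c = '>' <;> simp [pvSplit, h]

theorem pv_join_nil (ps : List (List Char)) : PySem.Chars.join [] ps = ps.flatten := by
  simp [PySem.Chars.join, List.intercalate]
  induction ps with
  | nil => simp
  | cons h t ih => cases t <;> simp_all [List.intersperse]

theorem pv_go (fuel : Nat) (l cur : List Char) (acc : List (List Char)) (h : l.length ≤ fuel) :
    PySem.Chars.splitOn.go ['>'] fuel l cur acc =
      acc.reverse ++ (cur.reverse ++ (pvSplit l).headD []) :: (pvSplit l).tail := by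
  induction fuel generalizing l cur acc with
  | zero =>
    have : l = [] := by cases l <;> simp_all
    subst this
    simp [PySem.Chars.splitOn.go, pvSplit]
  | succ n ih =>
    cases l with
    | nil => simp [PySem.Chars.splitOn.go, pvSplit]
    | cons c rest =>
      by_cases hc : c = '>'
      · subst hc
        rw [PySem.Chars.splitOn.go]
        simp only [List.isPrefixOf, beq_self_eq_true, Bool.true_and, if_pos, List.length_singleton, List.drop_one, List.tail_cons]
        rw [ih rest [] (cur.reverse :: acc) (by simpa using Nat.lt_succ_iff.mp (by simpa using h))]
        obtain ⟨p, ps, hps⟩ : ∃ p ps, pvSplit rest = p :: ps := by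
          cases hx : pvSplit rest with
          | nil => exact absurd hx (pvSplit_ne_nil rest)
          | cons p ps => exact ⟨p, ps, rfl⟩
        simp [pvSplit, hps]
      · rw [PySem.Chars.splitOn.go]
        have hpf : List.isPrefixOf ['>'] (c :: rest) = false := by
          simp [List.isPrefixOf]; exact fun he => hc he.symm
        rw [hpf]
        simp only [Bool.false_eq_true, if_false]
        rw [ih rest (c :: cur) acc (by simpa using Nat.lt_succ_iff.mp (by simpa using h))]
        obtain ⟨p, ps, hps⟩ : ∃ p ps, pvSplit rest = p :: ps := by
          cases hx : pvSplit rest with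
          | nil => exact absurd hx (pvSplit_ne_nil rest)
          | cons p ps => exact ⟨p, ps, rfl⟩
        simp [pvSplit, hc, hps]

theorem pv_splitOn_eq (cs : List Char) :
    PySem.Chars.splitOn cs ['>'] = ((pvSplit cs).headD []) :: (pvSplit cs).tail := by
  unfold PySem.Chars.splitOn
  rw [pv_go (cs.length + 1) cs [] [] (by omega)]
  simp

-- A's scan of the expanded buffer, from a counter of 0 (b = false) or 1 (b = true)
theorem pv_lemA (cs : List Char) (acc : List Char) (b : Bool) :
    (List.foldl pvStepA (acc, (if b then 1 else 0 : Int)) cs).1 =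
      acc ++ (pvSplit cs).headD [] ++ pvRe (pvSplit cs).tail b := by
  induction cs generalizing acc b with
  | nil => simp [pvSplit, pvRe]
  | cons c t ih =>
    by_cases hc : c = '>'
    · subst hc
      obtain ⟨p, ps, hps⟩ : ∃ p ps, pvSplit t = p :: ps := by
        cases hx : pvSplit t with
        | nil => exact absurd hx (pvSplit_ne_nil t)
        | cons p ps => exact ⟨p, ps, rfl⟩
      cases b with
      | false =>
        have hstep : List.foldl pvStepA (acc, (if (false : Bool) = true then 1 else 0 : Int)) ('>' :: t) =
            List.foldl pvStepA (acc ++ ['>'], (if (true : Bool) = true then 1 else 0 : Int)) t := by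
          simp [List.foldl, pvStepA]
        rw [hstep, ih]
        simp [pvSplit, pvRe, hps]
      | true =>
        have hstep : List.foldl pvStepA (acc, (if (true : Bool) = true then 1 else 0 : Int)) ('>' :: t) =
            List.foldl pvStepA (acc ++ ['>', '\n'], (if (false : Bool) = true then 1 else 0 : Int)) t := by
          simp [List.foldl, pvStepA]
        rw [hstep, ih]
        simp [pvSplit, pvRe, hps]
    · have hstep : List.foldl pvStepA (acc, (if b = true then 1 else 0 : Int)) (c :: t) =
          List.foldl pvStepA (acc ++ [c], (if b = true then 1 else 0 : Int)) t := by
        cases b <;> simp [List.foldl, pvStepA, hc]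
      rw [hstep, ih]
      simp [pvSplit, hc]

-- B's fold over range(k, len(parts)) rebuilds the dropped pieces, newline iff the index is even
theorem pv_lemB (parts : List (List Char)) (k : Nat) (acc : List (List Char)) (hk : 1 ≤ k) :
    (List.foldl (pvStepB parts) acc (PySem.List.pyRange (k : Int) (parts.length : Int) 1)).flatten =
      acc.flatten ++ pvRe (parts.drop k) (decide (k % 2 = 0)) := by
  by_cases hlt : k < parts.length
  · rw [PySem.List.pyRange_one_cons (by exact_mod_cast hlt)]
    simp only [List.foldl_cons]
    have hcast : ((k : Int) + 1) = ((k + 1 : Nat) : Int) := by push_cast; ring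
    rw [hcast]
    rw [pv_lemB parts (k + 1) _ (by omega)]
    have hdrop : parts.drop k = parts[k] :: parts.drop (k + 1) :=
      (List.drop_eq_getElem_cons hlt)
    have h2 : ∀ q r : Int, PySem.Int.mod (r + 2 * q) 2 = PySem.Int.mod r 2 := fun q r => by
      simp only [PySem.Int.mod]; exact Int.add_mul_fmod_self_left (a := r) (b := 2) (c := q)
    have hmod : (PySem.Int.mod (k : Int) 2 == 0) = decide (k % 2 = 0) := by
      by_cases h : k % 2 = 0
      · obtain ⟨q, hq⟩ := Nat.even_iff.mpr h
        have hk2 : (k : Int) = 0 + 2 * (q : Int) := by omega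
        rw [hk2, h2]
        simp [h]
      · obtain ⟨q, hq⟩ := Nat.odd_iff.mpr (Nat.mod_two_ne_zero.mp h)
        have hk2 : (k : Int) = 1 + 2 * (q : Int) := by omega
        rw [hk2, h2]
        simp [h]
    have hget : PySem.List.pyGetD parts (k : Int) [] = parts[k] := by
      rw [PySem.List.pyGetD_natCast]
      exact List.getD_eq_getElem _ _ hlt
    have hflag : (!decide (k % 2 = 0)) = decide ((k + 1) % 2 = 0) := by
      by_cases h : k % 2 = 0 <;> simp [h] <;> omega
    rw [hdrop]
    simp only [pvRe, pvStepB, hmod, hget, hflag]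
    by_cases hpar : k % 2 = 0 <;> simp [hpar, List.flatten_append]
  · rw [PySem.List.pyRange_one_eq_nil (by exact_mod_cast Nat.le_of_not_lt hlt)]
    rw [List.drop_eq_nil_of_le (Nat.le_of_not_lt hlt)]
    simp [pvRe]
termination_by parts.length - k

-- ===== VERDICT (by name: the statement is the Claim_ definition above) =====
theorem ajustarSaida_spec : Claim_equal_ajustarSaida := by
  intro s _
  unfold Spec_ajustarSaida ajustarSaida ajustarSaida_alt
  have hflat : PySem.Chars.join [] (s.toList.map (fun c => c :: " => ".toList)) =
      s.toList.foldl (fun ns i => ns ++ (i :: " => ".toList)) [] := by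
    rw [pv_join_nil, PySem.List.foldl_append_eq_flatMap, List.flatMap_def]
    simp
  set cs := s.toList.foldl (fun ns i => ns ++ (i :: " => ".toList)) [] with hcs
  have hsplit : PySem.Chars.splitOn cs ['>'] =
      ((pvSplit cs).headD []) :: (pvSplit cs).tail := pv_splitOn_eq cs
  have hA := pv_lemA cs [' '] false
  simp only [Bool.false_eq_true, if_false] at hA
  simp only [show ">".toList = ['>'] from rfl, hflat, hsplit, hA]
  have hB := pv_lemB (((pvSplit cs).headD []) :: (pvSplit cs).tail) 1
    [' ' :: PySem.List.pyGetD (((pvSplit cs).headD []) :: (pvSplit cs).tail) 0 []] le_rfl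
  have h1 : ((1 : Nat) : Int) = (1 : Int) := rfl
  rw [h1] at hB
  rw [pv_join_nil, hB]
  simp [PySem.List.pyGetD_zero_cons]
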